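-- pv_equiv track=rewrite | github.com/senicko/wdi-kolos-2 | 117.py | find
-- ===== SOURCE A (Python) =====
-- def is_fib(x, y):
--     a = 1
--     b = 1
--
--     while a <= x:
--         if a == x and b == y:
--             return True
--         a, b = b, a + b
--
--     return False
--
-- def in_bounds(r, c, n):
--     return r in range(n) and c in range(n)
--
-- def find(T):
--     n = len(T)
--
--     # funkcja pomocnicza uogolniajaca sprawdzanie warunku
--     # w dowolnym kierunku
--     def check_direction(r, c, direction):
--         dr, dc = direction
--
--         # Jezeli nie mozemy wykonac ruchu to koniec
--         if not in_bounds(r + dr, c + dc, n):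
--             return 0
--
--         # Jezeli dwa elementy w tym kierunku tworza podciag ciagu fibonacciego
--         if is_fib(T[r][c], T[r + dr][c + dc]):
--             seq = 2
--             a = (r, c)
--             b = (r + dr, c + dc)
--
--             # Zliczamy maksymalny podciag fibonacciego w tym kierunku
--             while (
--                 in_bounds(b[0] + dr, b[1] + dc, n)
--                 and T[b[0] + dr][b[1] + dc] == T[a[0]][a[1]] + T[b[0]][b[1]]
--             ):
--                 a, b = b, (b[0] + dr, b[1] + dc)
--                 seq += 1
--
--             return seq
--
--         return 0
--
--     maximum = 0
--
--     for r in range(n):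
--         for c in range(n):
--             # Znajdujemy najdluzszy podciag fibonacciego zaczynajacy sie
--             # w punkcie [r][c]
--             result = max(
--                 [
--                     check_direction(r, c, (1, 0)),
--                     check_direction(r, c, (-1, 0)),
--                     check_direction(r, c, (0, 1)),
--                     check_direction(r, c, (0, -1)),
--                 ]
--             )
--
--             # Aktualizujemy ostateczne znalezione maksimum
--             # (z innego punktu mozemy znalezc dluzszy podciag)
--             maximum = max(maximum, result)
--
--     return maximum if maximum > 2 else 0
-- ===== SOURCE B (Python) =====
-- def is_fib(x, y):
--     a = 1
--     b = 1
--     while a <= x: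
--         if a == x and b == y:
--             return True
--         a, b = b, a + b
--     return False
--
--
-- def find(T):
--     n = len(T)
--
--     # Linear DP over one line: run = length of the longest Fibonacci run
--     # ending at the current cell; return the best run length in the line.
--     def scan(seq):
--         best = 0
--         run = 0
--         for i in range(1, len(seq)):
--             if run >= 2 and seq[i] == seq[i - 1] + seq[i - 2]:
--                 run += 1
--             elif is_fib(seq[i - 1], seq[i]):
--                 run = 2
--             else:
--                 run = 0
--             best = max(best, run)
--         return best
--
--     rows = [[T[r][c] for c in range(n)] for r in range(n)]
--     cols = [[T[r][c] for r in range(n)] for c in range(n)]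
--
--     best = 0
--     for line in rows + cols:
--         best = max(best, scan(line))
--         best = max(best, scan(line[::-1]))
--
--     return best if best > 2 else 0
-- ===== Notes on version B (the rewrite author's own statement) =====
-- stated objective: faster
-- what changed: A re-walks the grid from every cell in all four directions (checking the Fibonacci start pair and then extending step by step), B makes one linear DP pass over each row/column in each orientation, carrying the length of the Fibonacci run ending at the current cell.
-- outside the precondition, e.g. on find([[]]): A returns 0, B raises IndexError
import Mathlib
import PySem

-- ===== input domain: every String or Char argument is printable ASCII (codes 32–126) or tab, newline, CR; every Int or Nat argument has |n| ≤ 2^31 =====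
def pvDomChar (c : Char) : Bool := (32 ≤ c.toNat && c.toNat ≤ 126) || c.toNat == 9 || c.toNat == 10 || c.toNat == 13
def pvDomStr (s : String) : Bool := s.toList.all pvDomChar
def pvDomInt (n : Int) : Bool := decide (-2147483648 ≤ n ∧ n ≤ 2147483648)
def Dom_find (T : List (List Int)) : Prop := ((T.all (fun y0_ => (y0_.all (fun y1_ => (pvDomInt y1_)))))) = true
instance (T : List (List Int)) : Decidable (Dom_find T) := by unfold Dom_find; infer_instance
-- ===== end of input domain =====

-- B replaces A's per-cell re-walk in four directions (O(n^3)) by one linear DP pass per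
-- line-orientation tracking the current run length (O(n^2) cell visits).


-- ===== PORT A =====

-- module-level helper is_fib (identical source in Source A and Source B, so shared by both ports).
-- The loop state keeps 1 ≤ a ≤ b ≤ 2a; these facts are carried only to justify termination
-- (a+b strictly grows and is bounded by 3x while the guard a ≤ x holds).
def isFibGo (x y : Int) (a b : Nat) (ha : 1 ≤ a) (hab : a ≤ b) (hba : b ≤ 2*a) : Bool :=
  if h : (a : Int) ≤ x then
    if (a : Int) = x ∧ (b : Int) = y then true
    else isFibGo x y b (a + b) (by omega) (by omega) (by omega)
  else false
termination_by (3 * x.toNat + 3) - (a + b)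
decreasing_by omega

def isFib (x y : Int) : Bool := isFibGo x y 1 1 (by omega) (by omega) (by omega)

-- T[r][c]: every index actually evaluated by either port is in [0,n) (guarded by in_bounds /
-- the range(n) loops), and Pre_find makes the rows long enough, so clamped indexing is exact there.
def pvGet (T : List (List Int)) (r c : Int) : Int := (T.getD r.toNat []).getD c.toNat 0

-- in_bounds(r, c, n) = r in range(n) and c in range(n)
def inBounds (r c n : Int) : Bool := decide ((0 ≤ r ∧ r < n) ∧ (0 ≤ c ∧ c < n))

-- the while loop of check_direction; the walked position moves one step inside [0,n) per
-- iteration, so fuel = n (passed at the call site) is never exhausted before the guard fails.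
def extGo (T : List (List Int)) (n dr dc : Int) (fuel : Nat) (a b : Int × Int) (seq : Int) : Int :=
  match fuel with
  | 0 => seq
  | fuel + 1 =>
    if inBounds (b.1 + dr) (b.2 + dc) n = true ∧
        pvGet T (b.1 + dr) (b.2 + dc) = pvGet T a.1 a.2 + pvGet T b.1 b.2 then
      extGo T n dr dc fuel b (b.1 + dr, b.2 + dc) (seq + 1)
    else seq

def checkDirection (T : List (List Int)) (n r c dr dc : Int) : Int :=
  if ¬ (inBounds (r + dr) (c + dc) n = true) then 0
  else if isFib (pvGet T r c) (pvGet T (r + dr) (c + dc)) = true then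
    extGo T n dr dc n.toNat (r, c) (r + dr, c + dc) 2
  else 0

def find (T : List (List Int)) : Int :=
  let n : Int := (T.length : Int)
  let maximum : Int :=
    (PySem.List.pyRange 0 n 1).foldl (fun acc r =>
      (PySem.List.pyRange 0 n 1).foldl (fun acc c =>
        max acc ((PySem.List.max? [checkDirection T n r c 1 0,
                                   checkDirection T n r c (-1) 0,
                                   checkDirection T n r c 0 1,
                                   checkDirection T n r c 0 (-1)] (fun v => v)).getD 0)) acc) 0
  if maximum > 2 then maximum else 0

-- ===== PORT B =====

-- scan: one DP pass over a line, run = length of the Fibonacci run ending at index i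
def scanGo (seq : List Int) (i : Nat) (run best : Int) : Int :=
  if _h : i < seq.length then
    let run' : Int :=
      if 2 ≤ run ∧ seq.getD i 0 = seq.getD (i-1) 0 + seq.getD (i-2) 0 then run + 1
      else if isFib (seq.getD (i-1) 0) (seq.getD i 0) = true then 2
      else 0
    scanGo seq (i+1) run' (max best run')
  else best
termination_by seq.length - i

def scan (seq : List Int) : Int := scanGo seq 1 0 0

def find_alt (T : List (List Int)) : Int :=
  let n := T.length
  let rows := (List.range n).map (fun r => (List.range n).map (fun c => (T.getD r []).getD c 0))
  let cols := (List.range n).map (fun c => (List.range n).map (fun r => (T.getD r []).getD c 0))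
  let best := (rows ++ cols).foldl (fun acc line => max (max acc (scan line)) (scan line.reverse)) 0
  if best > 2 then best else 0

-- ===== PRECONDITION & SPEC =====
-- Pre_ excludes the ragged grids on which the Python A raises IndexError (any row shorter than
-- len(T) is indexed when len(T) ≥ 2), together with the single returning corner
-- ([[]],) — one empty row — where A returns 0 without ever indexing but B's row extraction
-- raises IndexError.
def Pre_find (T : List (List Int)) : Prop := ∀ row ∈ T, T.length ≤ row.length
instance (T : List (List Int)) : Decidable (Pre_find T) := by unfold Pre_find; infer_instance

def pvWitness_find : List (List Int) := [[1, 1], [2, 3]]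

def Spec_find (T : List (List Int)) (out : Int) : Prop := out = find_alt T
instance (T : List (List Int)) (out : Int) : Decidable (Spec_find T out) := by unfold Spec_find; infer_instance

-- ===== CLAIM (what is proved, stated in full; the proofs are below) =====
def Claim_equal_find : Prop := ∀ (T : List (List Int)), Dom_find T → Pre_find T → Spec_find T (find T)

-- ===== LEMMAS AND PROOFS =====

-- ---------- generic fold-max lemmas ----------

theorem fold_ge_init {A : Type} (l : List A) (F : Int → A → Int)
    (mono : ∀ acc x, acc ≤ F acc x) (init : Int) : init ≤ l.foldl F init := by
  induction l generalizing init with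
  | nil => simp
  | cons x t ih => exact le_trans (mono init x) (ih (F init x))

theorem fold_preserve_le {A : Type} (l : List A) (F : Int → A → Int) (init c : Int)
    (h0 : init ≤ c) (h : ∀ acc x, acc ≤ c → x ∈ l → F acc x ≤ c) : l.foldl F init ≤ c := by
  induction l generalizing init with
  | nil => simpa
  | cons x t ih =>
    exact ih (F init x) (h init x h0 (by simp)) (fun acc y hy hm => h acc y hy (by simp [hm]))

theorem elem_le_fold {A : Type} (l : List A) (F : Int → A → Int)
    (mono : ∀ acc x, acc ≤ F acc x) (init : Int) (x : A) (hx : x ∈ l) (v : Int)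
    (hv : ∀ acc, v ≤ F acc x) : v ≤ l.foldl F init := by
  induction l generalizing init with
  | nil => simp at hx
  | cons y t ih =>
    rcases List.mem_cons.mp hx with h | h
    · subst h; exact le_trans (hv init) (fold_ge_init t F mono (F init x))
    · exact ih (F init y) h


-- ---------- the 1-D theory: a line is a function f : Nat → Int of length n ----------

-- A's while loop on a line: number of extension steps from index j on
def extF (f : Nat → Int) (n : Nat) (j : Nat) : Nat :=
  if _h : j < n ∧ f j = f (j-2) + f (j-1) then extF f n (j+1) + 1 else 0
termination_by n - j
decreasing_by omega

-- A's check_direction value for the start at index i of the line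
def svF (f : Nat → Int) (n : Nat) (i : Nat) : Int :=
  if i+1 < n ∧ isFib (f i) (f (i+1)) = true then 2 + (extF f n (i+2) : Int) else 0

-- B's DP: run length after processing index k
def runF (f : Nat → Int) : Nat → Int
  | 0 => 0
  | j+1 =>
    if 2 ≤ runF f j ∧ f (j+1) = f j + f (j-1) then runF f j + 1
    else if isFib (f j) (f (j+1)) = true then 2 else 0

-- max of runF over [i, n)
def topR (f : Nat → Int) (n i : Nat) : Int :=
  if _h : i < n then max (runF f i) (topR f n (i+1)) else 0
termination_by n - i
decreasing_by omega

theorem topR_nonneg (f : Nat → Int) (n i : Nat) : 0 ≤ topR f n i := by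
  unfold topR; split_ifs with h
  · exact le_max_of_le_right (topR_nonneg f n (i+1))
  · exact le_refl 0
termination_by n - i
decreasing_by omega

theorem runF_le_topR (f : Nat → Int) (n i k : Nat) (h1 : i ≤ k) (h2 : k < n) :
    runF f k ≤ topR f n i := by
  unfold topR; split_ifs with h
  · rcases Nat.eq_or_lt_of_le h1 with rfl | hlt
    · exact le_max_left _ _
    · exact le_max_of_le_right (runF_le_topR f n (i+1) k hlt h2)
  · omega
termination_by n - i
decreasing_by omega

theorem topR_le (f : Nat → Int) (n i : Nat) (c : Int) (hc : 0 ≤ c)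
    (h : ∀ k, i ≤ k → k < n → runF f k ≤ c) : topR f n i ≤ c := by
  unfold topR; split_ifs with hin
  · exact max_le (h i le_rfl hin) (topR_le f n (i+1) c hc (fun k hk1 hk2 => h k (by omega) hk2))
  · exact hc
termination_by n - i
decreasing_by omega

-- scanGo computes the suffix maximum of the DP
theorem scanGo_eq (seq : List Int) (i : Nat) (best : Int) (hi : 1 ≤ i) (hb : 0 ≤ best) :
    scanGo seq i (runF (fun j => seq.getD j 0) (i-1)) best
      = max best (topR (fun j => seq.getD j 0) seq.length i) := by
  by_cases h : i < seq.length
  · have hrun : runF (fun j => seq.getD j 0) i =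
        (if 2 ≤ runF (fun j => seq.getD j 0) (i-1) ∧
            seq.getD i 0 = seq.getD (i-1) 0 + seq.getD (i-2) 0
         then runF (fun j => seq.getD j 0) (i-1) + 1
         else if isFib (seq.getD (i-1) 0) (seq.getD i 0) = true then 2 else 0) := by
      conv_lhs => rw [show i = (i-1)+1 by omega]
      rw [runF]
      rw [show i-1+1 = i by omega, show i-1-1 = i-2 by omega]
    rw [scanGo, dif_pos h]
    simp only []
    rw [← hrun]
    have hih := scanGo_eq seq (i+1) (max best (runF (fun j => seq.getD j 0) i))
          (by omega) (le_max_of_le_left hb)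
    rw [show (i+1)-1 = i by omega] at hih
    rw [hih]
    conv_rhs => rw [topR]
    rw [dif_pos h, max_assoc]
  · rw [scanGo, dif_neg h, topR, dif_neg h]
    omega
termination_by seq.length - i
decreasing_by omega

theorem scan_eq (seq : List Int) :
    scan seq = max 0 (topR (fun j => seq.getD j 0) seq.length 1) := by
  have := scanGo_eq seq 1 0 le_rfl le_rfl
  simpa [scan, runF] using this

-- extF facts: every counted step is an in-bounds recurrence step
theorem extF_rec_all (f : Nat → Int) (n : Nat) :
    ∀ t m, t < extF f n m → m + t < n ∧ f (m+t) = f (m+t-2) + f (m+t-1) := by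
  intro t
  induction t with
  | zero =>
    intro m h
    rw [extF] at h
    by_cases hc : m < n ∧ f m = f (m-2) + f (m-1)
    · simpa using hc
    · rw [dif_neg hc] at h; omega
  | succ t ih =>
    intro m h
    rw [extF] at h
    by_cases hc : m < n ∧ f m = f (m-2) + f (m-1)
    · rw [dif_pos hc] at h
      have := ih (m+1) (by omega)
      rw [show m + (t+1) = (m+1) + t by omega]
      exact this
    · rw [dif_neg hc] at h; omega

-- extF lower bound from a recurrence segment
theorem extF_lb (f : Nat → Int) (n : Nat) :
    ∀ t m k, k + 1 - m = t → k < n → (∀ j, m ≤ j → j ≤ k → f j = f (j-2) + f (j-1)) →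
      k + 1 - m ≤ extF f n m := by
  intro t
  induction t with
  | zero =>
    intro m k ht _ _
    omega
  | succ t ih =>
    intro m k ht hk hrec
    have hm : m ≤ k := by omega
    have hcond : m < n ∧ f m = f (m-2) + f (m-1) := ⟨by omega, hrec m le_rfl hm⟩
    rw [extF, dif_pos hcond]
    have := ih (m+1) k (by omega) hk (fun j h1 h2 => hrec j (by omega) h2)
    omega

-- the DP run ending at k is a Fibonacci segment
theorem runF_char (f : Nat → Int) :
    ∀ k, 1 ≤ k → 2 ≤ runF f k →
      ∃ (L i : Nat), runF f k = (L : Int) ∧ i + L = k + 1 ∧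
        isFib (f i) (f (i+1)) = true ∧ (∀ j, i+2 ≤ j → j ≤ k → f j = f (j-2) + f (j-1)) := by
  intro k
  induction k with
  | zero => intro h; omega
  | succ j ih =>
    intro _ h2
    rw [runF] at h2 ⊢
    by_cases h1 : 2 ≤ runF f j ∧ f (j+1) = f j + f (j-1)
    · rw [if_pos h1] at h2 ⊢
      have hj : 1 ≤ j := by
        rcases Nat.eq_zero_or_pos j with rfl | h
        · have := h1.1; simp [runF] at this
        · exact h
      rcases ih hj h1.1 with ⟨L, i, hval, hsum, hfib, hrec⟩
      refine ⟨L+1, i, by rw [hval]; push_cast; ring, by omega, hfib, ?_⟩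
      intro j' hj1 hj2
      rcases Nat.lt_or_ge j' (j+1) with hlt | hge
      · exact hrec j' hj1 (by omega)
      · have hj' : j' = j+1 := by omega
        subst hj'
        rw [show j+1-2 = j-1 by omega, show j+1-1 = j by omega, h1.2]
        ring
    · rw [if_neg h1] at h2 ⊢
      by_cases hf : isFib (f j) (f (j+1)) = true
      · rw [if_pos hf] at h2 ⊢
        exact ⟨2, j, by norm_num, by omega, hf, fun j' h1' h2' => by omega⟩
      · rw [if_neg hf] at h2; omega

-- a Fibonacci segment bounds A's start value from below
theorem sv_ge (f : Nat → Int) (n : Nat) (i L k : Nat) (hik : i + L = k + 1) (hL : 2 ≤ L)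
    (hk : k < n) (hfib : isFib (f i) (f (i+1)) = true)
    (hrec : ∀ j, i+2 ≤ j → j ≤ k → f j = f (j-2) + f (j-1)) : (L : Int) ≤ svF f n i := by
  have hin : i + 1 < n := by omega
  unfold svF
  rw [if_pos ⟨hin, hfib⟩]
  have hlb := extF_lb f n (k+1-(i+2)) (i+2) k rfl hk hrec
  omega

-- every DP run is dominated by some start value
theorem runF_le_sv (f : Nat → Int) (n : Nat) (k : Nat) (h1 : 1 ≤ k) (hk : k < n)
    (h2 : 2 ≤ runF f k) : ∃ i, i < n ∧ runF f k ≤ svF f n i := by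
  rcases runF_char f k h1 h2 with ⟨L, i, hval, hsum, hfib, hrec⟩
  have hL : 2 ≤ L := by omega
  exact ⟨i, by omega, by rw [hval]; exact sv_ge f n i L k hsum hL hk hfib hrec⟩

-- every start value is dominated by some DP run
theorem sv_le_runF (f : Nat → Int) (n : Nat) (i : Nat) (hne : svF f n i ≠ 0) :
    ∃ k, 1 ≤ k ∧ k < n ∧ svF f n i ≤ runF f k := by
  unfold svF at hne ⊢
  by_cases hg : i+1 < n ∧ isFib (f i) (f (i+1)) = true
  · rw [if_pos hg] at hne ⊢
    set e := extF f n (i+2) with he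
    have key : ∀ t, t ≤ e → (2 + t : Int) ≤ runF f (i+1+t) := by
      intro t
      induction t with
      | zero =>
        intro _
        rw [show i+1+0 = i+1 by omega, runF]
        split_ifs with h1 h2
        · have := h1.1; omega
        · omega
        · exact absurd hg.2 h2
      | succ t iht =>
        intro hte
        have hrec := extF_rec_all f n t (i+2) (by omega)
        have hv := iht (by omega)
        rw [show i+1+(t+1) = (i+1+t)+1 by omega, runF]
        have hcond : 2 ≤ runF f (i+1+t) ∧ f (i+1+t+1) = f (i+1+t) + f (i+1+t-1) := by
        
          refine ⟨by omega, ?_⟩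
          have h2 := hrec.2
          rw [show (i+2)+t-2 = i+t by omega, show (i+2)+t-1 = i+1+t by omega] at h2
          rw [show i+1+t+1 = i+2+t by omega, show i+1+t-1 = i+t by omega, h2]
          ring
        rw [if_pos hcond]
        push_cast
        push_cast at hv
        omega
    have hk := key e le_rfl
    refine ⟨i+1+e, by omega, ?_, hk⟩
    rcases Nat.eq_zero_or_pos e with he0 | he1
    · omega
    · have := (extF_rec_all f n (e-1) (i+2) (by omega)).1
      omega
  · rw [if_neg hg] at hne
    exact absurd rfl hne


-- ---------- congruence: only values below n matter ----------

theorem extF_congr (f g : Nat → Int) (n : Nat) (hfg : ∀ j, j < n → f j = g j) :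
    ∀ m, extF f n m = extF g n m := by
  intro m
  conv_lhs => rw [extF]
  conv_rhs => rw [extF]
  by_cases hc : m < n ∧ f m = f (m-2) + f (m-1)
  · have hc' : m < n ∧ g m = g (m-2) + g (m-1) := by
      refine ⟨hc.1, ?_⟩
      rw [← hfg m hc.1, ← hfg (m-2) (by omega), ← hfg (m-1) (by omega)]
      exact hc.2
    rw [dif_pos hc, dif_pos hc', extF_congr f g n hfg (m+1)]
  · have hc' : ¬(m < n ∧ g m = g (m-2) + g (m-1)) := by
      intro hc2
      exact hc ⟨hc2.1, by
        rw [hfg m hc2.1, hfg (m-2) (by omega), hfg (m-1) (by omega)]; exact hc2.2⟩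
    rw [dif_neg hc, dif_neg hc']
termination_by m => n - m
decreasing_by omega

theorem runF_congr (f g : Nat → Int) (n : Nat) (hfg : ∀ j, j < n → f j = g j) :
    ∀ k, k < n → runF f k = runF g k := by
  intro k
  induction k with
  | zero => intro _; simp [runF]
  | succ j ih =>
    intro h
    rw [runF, runF, ih (by omega)]
    rw [hfg (j+1) h, hfg j (by omega), hfg (j-1) (by omega)]

theorem topR_congr (f g : Nat → Int) (n : Nat) (hfg : ∀ j, j < n → f j = g j) :
    ∀ i, topR f n i = topR g n i := by
  intro i
  conv_lhs => rw [topR]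
  conv_rhs => rw [topR]
  by_cases h : i < n
  · rw [dif_pos h, dif_pos h, runF_congr f g n hfg i h, topR_congr f g n hfg (i+1)]
  · rw [dif_neg h, dif_neg h]
termination_by i => n - i
decreasing_by omega

theorem runF_zero_or_ge_two (f : Nat → Int) (k : Nat) : runF f k = 0 ∨ 2 ≤ runF f k := by
  cases k with
  | zero => left; rfl
  | succ j => rw [runF]; split_ifs with h1 h2 <;> [right; right; left] <;> omega

-- scan of a line whose entries below its length are f
theorem scan_line (line : List Int) (f : Nat → Int)
    (hf : ∀ j, j < line.length → line.getD j 0 = f j) :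
    scan line = max 0 (topR f line.length 1) := by
  rw [scan_eq, topR_congr (fun j => line.getD j 0) f line.length hf 1]

-- ---------- the grid: cells, canonical line functions ----------

def cellT (T : List (List Int)) (r c : Nat) : Int := (T.getD r []).getD c 0

def fRow (T : List (List Int)) (r : Nat) : Nat → Int := fun j => cellT T r j
def fRowR (T : List (List Int)) (r : Nat) : Nat → Int := fun j => cellT T r (T.length - 1 - j)
def fCol (T : List (List Int)) (c : Nat) : Nat → Int := fun j => cellT T j c
def fColR (T : List (List Int)) (c : Nat) : Nat → Int := fun j => cellT T (T.length - 1 - j) c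

-- A's while loop along an abstract straight walk p equals extF of the line function f
theorem ext_gen (T : List (List Int)) (nn : Nat) (dr dc : Int) (p : Nat → Int × Int)
    (f : Nat → Int)
    (hstep : ∀ j, p (j+1) = ((p j).1 + dr, (p j).2 + dc))
    (hin : ∀ j, inBounds (p j).1 (p j).2 (nn : Int) = decide (j < nn))
    (hget : ∀ j, j < nn → pvGet T (p j).1 (p j).2 = f j) :
    ∀ fuel j s, 1 ≤ j → j < nn → nn ≤ fuel + j + 1 →
      extGo T (nn : Int) dr dc fuel (p (j-1)) (p j) s = s + (extF f nn (j+1) : Int) := by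
  intro fuel
  induction fuel with
  | zero =>
    intro j s h1 h2 h3
    rw [extGo.eq_def]
    rw [extF, dif_neg (by omega : ¬(j+1 < nn ∧ f (j+1) = f (j+1-2) + f (j+1-1)))]
    simp
  | succ fuel ih =>
    intro j s h1 h2 h3
    rw [extGo.eq_def]
    simp only []
    have hc1 : (p j).1 + dr = (p (j+1)).1 := by rw [hstep]
    have hc2 : (p j).2 + dc = (p (j+1)).2 := by rw [hstep]
    rw [hc1, hc2, hin (j+1)]
    by_cases hnext : j + 1 < nn
    · have hgj1 : pvGet T (p (j+1)).1 (p (j+1)).2 = f (j+1) := hget (j+1) hnext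
      have hgj : pvGet T (p j).1 (p j).2 = f j := hget j h2
      have hgjm : pvGet T (p (j-1)).1 (p (j-1)).2 = f (j-1) := hget (j-1) (by omega)
      rw [hgj1, hgj, hgjm]
      by_cases heq : f (j+1) = f (j-1) + f j
      · rw [if_pos (by simp [hnext, heq])]
        have hrec := ih (j+1) (s+1) (by omega) hnext (by omega)
        rw [show j+1-1 = j by omega] at hrec
        simp only [Prod.mk.eta]
        rw [hrec]
        conv_rhs => rw [extF]
        rw [dif_pos ⟨hnext, by rw [show j+1-2 = j-1 by omega, show j+1-1 = j by omega]; exact heq⟩]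
        push_cast
        ring
      · rw [if_neg (by simp [heq])]
        rw [extF, dif_neg (by
          rw [show j+1-2 = j-1 by omega, show j+1-1 = j by omega]
          exact fun hx => heq hx.2)]
        simp
    · rw [if_neg (by simp [hnext])]
      rw [extF, dif_neg (fun hx => hnext hx.1)]
      simp

-- check_direction at the i-th point of the walk is A's per-start value svF
theorem check_gen (T : List (List Int)) (nn : Nat) (dr dc : Int) (p : Nat → Int × Int)
    (f : Nat → Int)
    (hstep : ∀ j, p (j+1) = ((p j).1 + dr, (p j).2 + dc))
    (hin : ∀ j, inBounds (p j).1 (p j).2 (nn : Int) = decide (j < nn))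
    (hget : ∀ j, j < nn → pvGet T (p j).1 (p j).2 = f j)
    (i : Nat) (hi : i < nn) :
    checkDirection T (nn : Int) (p i).1 (p i).2 dr dc = svF f nn i := by
  unfold checkDirection
  have hc1 : (p i).1 + dr = (p (i+1)).1 := by rw [hstep]
  have hc2 : (p i).2 + dc = (p (i+1)).2 := by rw [hstep]
  rw [hc1, hc2, hin (i+1)]
  by_cases hnext : i + 1 < nn
  · rw [if_neg (by simp [hnext])]
    rw [hget i hi, hget (i+1) hnext]
    by_cases hf : isFib (f i) (f (i+1)) = true
    · rw [if_pos hf]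
      have hfuel : (nn : Int).toNat = nn := by omega
      have hext := ext_gen T nn dr dc p f hstep hin hget nn (i+1) 2 (by omega) hnext (by omega)
      rw [show i+1-1 = i by omega] at hext
      simp only [Prod.mk.eta]
      rw [hfuel, hext]
      rw [svF, if_pos ⟨hnext, hf⟩, show i+1+1 = i+2 by omega]
    · rw [if_neg hf, svF, if_neg (fun hx => hf hx.2)]
  · rw [if_pos (by simp [hnext]), svF, if_neg (fun hx => hnext hx.1)]

theorem check_gen' (T : List (List Int)) (nn : Nat) (dr dc : Int) (p : Nat → Int × Int)
    (f : Nat → Int)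
    (hstep : ∀ j, p (j+1) = ((p j).1 + dr, (p j).2 + dc))
    (hin : ∀ j, inBounds (p j).1 (p j).2 (nn : Int) = decide (j < nn))
    (hget : ∀ j, j < nn → pvGet T (p j).1 (p j).2 = f j)
    (i : Nat) (hi : i < nn) (a b : Int) (ha : a = (p i).1) (hb : b = (p i).2) :
    checkDirection T (nn : Int) a b dr dc = svF f nn i := by
  rw [ha, hb]; exact check_gen T nn dr dc p f hstep hin hget i hi

theorem check_right (T : List (List Int)) (r c : Nat) (hr : r < T.length) (hc : c < T.length) :
    checkDirection T (T.length : Int) (r : Int) (c : Int) 0 1 = svF (fRow T r) T.length c := by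
  refine check_gen' T T.length 0 1 (fun j => ((r : Int), (j : Int))) (fRow T r)
    (fun j => ?_) (fun j => ?_) (fun j hj => ?_) c hc (r : Int) (c : Int) rfl rfl
  · show ((r : Int), ((j+1 : Nat) : Int)) = ((r : Int) + 0, (j : Int) + 1)
    rw [Prod.ext_iff]; constructor
    · omega
    · push_cast; omega
  · show inBounds (r : Int) (j : Int) (T.length : Int) = decide (j < T.length)
    unfold inBounds; rw [decide_eq_decide]; omega
  · show pvGet T (r : Int) (j : Int) = fRow T r j
    simp [pvGet, fRow, cellT]

theorem check_left (T : List (List Int)) (r c : Nat) (hr : r < T.length) (hc : c < T.length) :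
    checkDirection T (T.length : Int) (r : Int) (c : Int) 0 (-1)
      = svF (fRowR T r) T.length (T.length - 1 - c) := by
  refine check_gen' T T.length 0 (-1)
    (fun j => ((r : Int), (T.length : Int) - 1 - (j : Int))) (fRowR T r)
    (fun j => ?_) (fun j => ?_) (fun j hj => ?_) (T.length - 1 - c) (by omega)
    (r : Int) (c : Int) rfl ?_
  · show ((r : Int), (T.length : Int) - 1 - ((j+1 : Nat) : Int))
        = ((r : Int) + 0, ((T.length : Int) - 1 - (j : Int)) + (-1))
    rw [Prod.ext_iff]; constructor
    · omega
    · push_cast; omega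
  · show inBounds (r : Int) ((T.length : Int) - 1 - (j : Int)) (T.length : Int)
        = decide (j < T.length)
    unfold inBounds; rw [decide_eq_decide]; omega
  · show pvGet T (r : Int) ((T.length : Int) - 1 - (j : Int)) = fRowR T r j
    have ht : ((T.length : Int) - 1 - (j : Int)).toNat = T.length - 1 - j := by omega
    simp [pvGet, fRowR, cellT, ht]
  · show (c : Int) = (T.length : Int) - 1 - ((T.length - 1 - c : Nat) : Int)
    omega

theorem check_down (T : List (List Int)) (r c : Nat) (hr : r < T.length) (hc : c < T.length) :
    checkDirection T (T.length : Int) (r : Int) (c : Int) 1 0 = svF (fCol T c) T.length r := by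
  refine check_gen' T T.length 1 0 (fun j => ((j : Int), (c : Int))) (fCol T c)
    (fun j => ?_) (fun j => ?_) (fun j hj => ?_) r hr (r : Int) (c : Int) rfl rfl
  · show (((j+1 : Nat) : Int), (c : Int)) = ((j : Int) + 1, (c : Int) + 0)
    rw [Prod.ext_iff]; constructor
    · push_cast; omega
    · omega
  · show inBounds (j : Int) (c : Int) (T.length : Int) = decide (j < T.length)
    unfold inBounds; rw [decide_eq_decide]; omega
  · show pvGet T (j : Int) (c : Int) = fCol T c j
    simp [pvGet, fCol, cellT]

theorem check_up (T : List (List Int)) (r c : Nat) (hr : r < T.length) (hc : c < T.length) :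
    checkDirection T (T.length : Int) (r : Int) (c : Int) (-1) 0
      = svF (fColR T c) T.length (T.length - 1 - r) := by
  refine check_gen' T T.length (-1) 0
    (fun j => ((T.length : Int) - 1 - (j : Int), (c : Int))) (fColR T c)
    (fun j => ?_) (fun j => ?_) (fun j hj => ?_) (T.length - 1 - r) (by omega)
    (r : Int) (c : Int) ?_ rfl
  · show ((T.length : Int) - 1 - ((j+1 : Nat) : Int), (c : Int))
        = (((T.length : Int) - 1 - (j : Int)) + (-1), (c : Int) + 0)
    rw [Prod.ext_iff]; constructor
    · push_cast; omega
    · omega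
  · show inBounds ((T.length : Int) - 1 - (j : Int)) (c : Int) (T.length : Int)
        = decide (j < T.length)
    unfold inBounds; rw [decide_eq_decide]; omega
  · show pvGet T ((T.length : Int) - 1 - (j : Int)) (c : Int) = fColR T c j
    have ht : ((T.length : Int) - 1 - (j : Int)).toNat = T.length - 1 - j := by omega
    simp [pvGet, fColR, cellT, ht]
  · show (r : Int) = (T.length : Int) - 1 - ((T.length - 1 - r : Nat) : Int)
    omega

-- ---------- assembling the grid maxima ----------

theorem max4_getD (a b c d : Int) :
    (PySem.List.max? [a, b, c, d] (fun v => v)).getD 0 = max (max (max a b) c) d := by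
  rw [PySem.List.max?_id_cons]
  simp [List.foldl]

theorem getD_rev (l : List Int) (j : Nat) (hj : j < l.length) :
    l.reverse.getD j 0 = l.getD (l.length - 1 - j) 0 := by
  rw [List.getD_eq_getElem?_getD, List.getD_eq_getElem?_getD, List.getElem?_reverse hj]

-- the two grid maxima, named
def AmaxD (T : List (List Int)) : Int :=
  (PySem.List.pyRange 0 (T.length : Int) 1).foldl (fun acc r =>
    (PySem.List.pyRange 0 (T.length : Int) 1).foldl (fun acc c =>
      max acc ((PySem.List.max? [checkDirection T (T.length : Int) r c 1 0,
                                 checkDirection T (T.length : Int) r c (-1) 0,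
                                 checkDirection T (T.length : Int) r c 0 1,
                                 checkDirection T (T.length : Int) r c 0 (-1)]
                 (fun v => v)).getD 0)) acc) 0

def rowsD (T : List (List Int)) : List (List Int) :=
  (List.range T.length).map (fun r => (List.range T.length).map (fun c => (T.getD r []).getD c 0))

def colsD (T : List (List Int)) : List (List Int) :=
  (List.range T.length).map (fun c => (List.range T.length).map (fun r => (T.getD r []).getD c 0))

def BmaxD (T : List (List Int)) : Int :=
  (rowsD T ++ colsD T).foldl (fun acc line => max (max acc (scan line)) (scan line.reverse)) 0

theorem find_as_Amax (T : List (List Int)) :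
    find T = if AmaxD T > 2 then AmaxD T else 0 := rfl

theorem find_alt_as_Bmax (T : List (List Int)) :
    find_alt T = if BmaxD T > 2 then BmaxD T else 0 := rfl

-- the scans of the four line families
theorem scan_rowL (T : List (List Int)) (r : Nat) :
    scan ((List.range T.length).map (fun c => (T.getD r []).getD c 0))
      = max 0 (topR (fRow T r) T.length 1) := by
  have hlen : ((List.range T.length).map (fun c => (T.getD r []).getD c 0)).length
      = T.length := by simp
  have h := scan_line ((List.range T.length).map (fun c => (T.getD r []).getD c 0)) (fRow T r)
    (fun j hj => PySem.List.getD_map_range _ _ _ _ (by omega))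
  rwa [hlen] at h

theorem scan_rowL_rev (T : List (List Int)) (r : Nat) :
    scan ((List.range T.length).map (fun c => (T.getD r []).getD c 0)).reverse
      = max 0 (topR (fRowR T r) T.length 1) := by
  have hlen : ((List.range T.length).map (fun c => (T.getD r []).getD c 0)).length
      = T.length := by simp
  have h := scan_line ((List.range T.length).map (fun c => (T.getD r []).getD c 0)).reverse
    (fRowR T r) (fun j hj => by
      rw [List.length_reverse, hlen] at hj
      rw [getD_rev _ j (by omega), hlen, PySem.List.getD_map_range _ _ _ _ (by omega)]
      rfl)
  rwa [List.length_reverse, hlen] at h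

theorem scan_colL (T : List (List Int)) (c : Nat) :
    scan ((List.range T.length).map (fun r => (T.getD r []).getD c 0))
      = max 0 (topR (fCol T c) T.length 1) := by
  have hlen : ((List.range T.length).map (fun r => (T.getD r []).getD c 0)).length
      = T.length := by simp
  have h := scan_line ((List.range T.length).map (fun r => (T.getD r []).getD c 0)) (fCol T c)
    (fun j hj => PySem.List.getD_map_range _ _ _ _ (by omega))
  rwa [hlen] at h

theorem scan_colL_rev (T : List (List Int)) (c : Nat) :
    scan ((List.range T.length).map (fun r => (T.getD r []).getD c 0)).reverse
      = max 0 (topR (fColR T c) T.length 1) := by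
  have hlen : ((List.range T.length).map (fun r => (T.getD r []).getD c 0)).length
      = T.length := by simp
  have h := scan_line ((List.range T.length).map (fun r => (T.getD r []).getD c 0)).reverse
    (fColR T c) (fun j hj => by
      rw [List.length_reverse, hlen] at hj
      rw [getD_rev _ j (by omega), hlen, PySem.List.getD_map_range _ _ _ _ (by omega)]
      rfl)
  rwa [List.length_reverse, hlen] at h

-- the per-cell 4-way maximum, as Int arguments
theorem cell_le_Amax (T : List (List Int)) (rn cn : Nat)
    (hr : rn < T.length) (hc : cn < T.length) :
    (PySem.List.max? [checkDirection T (T.length : Int) (rn : Int) (cn : Int) 1 0,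
                      checkDirection T (T.length : Int) (rn : Int) (cn : Int) (-1) 0,
                      checkDirection T (T.length : Int) (rn : Int) (cn : Int) 0 1,
                      checkDirection T (T.length : Int) (rn : Int) (cn : Int) 0 (-1)]
      (fun v => v)).getD 0 ≤ AmaxD T := by
  apply elem_le_fold _ _ (fun acc _ => fold_ge_init _ _ (fun a _ => le_max_left a _) acc) 0
    ((rn : Nat) : Int)
    (PySem.List.mem_pyRange_one.mpr ⟨by omega, by omega⟩)
  intro acc
  apply elem_le_fold _ _ (fun a _ => le_max_left a _) acc ((cn : Nat) : Int)
    (PySem.List.mem_pyRange_one.mpr ⟨by omega, by omega⟩)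
  intro acc2
  exact le_max_right _ _

theorem Amax_nonneg (T : List (List Int)) : 0 ≤ AmaxD T :=
  fold_ge_init _ _ (fun acc _ => fold_ge_init _ _ (fun a _ => le_max_left a _) acc) 0

theorem Bmax_nonneg (T : List (List Int)) : 0 ≤ BmaxD T :=
  fold_ge_init _ _ (fun _ _ => le_trans (le_max_left _ _) (le_max_left _ _)) 0

-- every per-start value of each of the four line families is below Amax
theorem sv_fam_le_Amax (T : List (List Int)) :
    (∀ r i, r < T.length → i < T.length → svF (fRow T r) T.length i ≤ AmaxD T) ∧
    (∀ r i, r < T.length → i < T.length → svF (fRowR T r) T.length i ≤ AmaxD T) ∧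
    (∀ c i, c < T.length → i < T.length → svF (fCol T c) T.length i ≤ AmaxD T) ∧
    (∀ c i, c < T.length → i < T.length → svF (fColR T c) T.length i ≤ AmaxD T) := by
  have comp : ∀ (a b c d : Int),
      a ≤ (PySem.List.max? [a,b,c,d] (fun v => v)).getD 0 ∧
      b ≤ (PySem.List.max? [a,b,c,d] (fun v => v)).getD 0 ∧
      c ≤ (PySem.List.max? [a,b,c,d] (fun v => v)).getD 0 ∧
      d ≤ (PySem.List.max? [a,b,c,d] (fun v => v)).getD 0 := by
    intro a b c d
    rw [max4_getD]
    refine ⟨?_, ?_, ?_, le_max_right _ _⟩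
    · exact le_max_of_le_left (le_max_of_le_left (le_max_left _ _))
    · exact le_max_of_le_left (le_max_of_le_left (le_max_right _ _))
    · exact le_max_of_le_left (le_max_right _ _)
  refine ⟨?_, ?_, ?_, ?_⟩
  · intro r i hr hi
    rw [← check_right T r i hr hi]
    exact le_trans (comp _ _ _ _).2.2.1 (cell_le_Amax T r i hr hi)
  · intro r i hr hi
    have h := check_left T r (T.length - 1 - i) hr (by omega)
    rw [show T.length - 1 - (T.length - 1 - i) = i by omega] at h
    rw [← h]
    exact le_trans (comp _ _ _ _).2.2.2 (cell_le_Amax T r (T.length - 1 - i) hr (by omega))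
  · intro c i hc hi
    rw [← check_down T i c hi hc]
    exact le_trans (comp _ _ _ _).1 (cell_le_Amax T i c hi hc)
  · intro c i hc hi
    have h := check_up T (T.length - 1 - i) c (by omega) hc
    rw [show T.length - 1 - (T.length - 1 - i) = i by omega] at h
    rw [← h]
    exact le_trans (comp _ _ _ _).2.1 (cell_le_Amax T (T.length - 1 - i) c (by omega) hc)

-- a whole line family value is below Amax
theorem top_fam_le_Amax (T : List (List Int)) (f : Nat → Int)
    (hsv : ∀ i, i < T.length → svF f T.length i ≤ AmaxD T) :
    max 0 (topR f T.length 1) ≤ AmaxD T := by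
  apply max_le (Amax_nonneg T)
  apply topR_le f T.length 1 _ (Amax_nonneg T)
  intro k hk1 hk2
  rcases runF_zero_or_ge_two f k with h0 | h2
  · rw [h0]; exact Amax_nonneg T
  · rcases runF_le_sv f T.length k hk1 hk2 h2 with ⟨i, hi, hle⟩
    exact le_trans hle (hsv i hi)

theorem Bmax_le_Amax (T : List (List Int)) : BmaxD T ≤ AmaxD T := by
  apply fold_preserve_le _ _ _ _ (Amax_nonneg T)
  intro acc line hacc hline
  rcases List.mem_append.mp hline with hmem | hmem
  · rcases List.mem_map.mp hmem with ⟨r, hr, rfl⟩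
    have hr' : r < T.length := List.mem_range.mp hr
    apply max_le (max_le hacc _) _
    · rw [scan_rowL]
      exact top_fam_le_Amax T _ (fun i hi => (sv_fam_le_Amax T).1 r i hr' hi)
    · rw [scan_rowL_rev]
      exact top_fam_le_Amax T _ (fun i hi => (sv_fam_le_Amax T).2.1 r i hr' hi)
  · rcases List.mem_map.mp hmem with ⟨c, hcm, rfl⟩
    have hc' : c < T.length := List.mem_range.mp hcm
    apply max_le (max_le hacc _) _
    · rw [scan_colL]
      exact top_fam_le_Amax T _ (fun i hi => (sv_fam_le_Amax T).2.2.1 c i hc' hi)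
    · rw [scan_colL_rev]
      exact top_fam_le_Amax T _ (fun i hi => (sv_fam_le_Amax T).2.2.2 c i hc' hi)

-- the line-family tops are below Bmax
theorem top_fam_le_Bmax (T : List (List Int)) :
    (∀ r, r < T.length → max 0 (topR (fRow T r) T.length 1) ≤ BmaxD T) ∧
    (∀ r, r < T.length → max 0 (topR (fRowR T r) T.length 1) ≤ BmaxD T) ∧
    (∀ c, c < T.length → max 0 (topR (fCol T c) T.length 1) ≤ BmaxD T) ∧
    (∀ c, c < T.length → max 0 (topR (fColR T c) T.length 1) ≤ BmaxD T) := by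
  have monoB : ∀ (acc : Int) (x : List Int),
      acc ≤ max (max acc (scan x)) (scan x.reverse) :=
    fun acc _ => le_trans (le_max_left _ _) (le_max_left _ _)
  refine ⟨?_, ?_, ?_, ?_⟩
  · intro r hr
    rw [← scan_rowL]
    exact elem_le_fold _ _ monoB 0 _
      (List.mem_append_left _ (List.mem_map.mpr ⟨r, List.mem_range.mpr hr, rfl⟩)) _
      (fun acc => le_max_of_le_left (le_max_right _ _))
  · intro r hr
    rw [← scan_rowL_rev]
    exact elem_le_fold _ _ monoB 0 _
      (List.mem_append_left _ (List.mem_map.mpr ⟨r, List.mem_range.mpr hr, rfl⟩)) _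
      (fun acc => le_max_right _ _)
  · intro c hc
    rw [← scan_colL]
    exact elem_le_fold _ _ monoB 0 _
      (List.mem_append_right _ (List.mem_map.mpr ⟨c, List.mem_range.mpr hc, rfl⟩)) _
      (fun acc => le_max_of_le_left (le_max_right _ _))
  · intro c hc
    rw [← scan_colL_rev]
    exact elem_le_fold _ _ monoB 0 _
      (List.mem_append_right _ (List.mem_map.mpr ⟨c, List.mem_range.mpr hc, rfl⟩)) _
      (fun acc => le_max_right _ _)

theorem sv_le_Bmax (T : List (List Int)) (f : Nat → Int) (i : Nat) (_hi : i < T.length)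
    (htop : max 0 (topR f T.length 1) ≤ BmaxD T) : svF f T.length i ≤ BmaxD T := by
  rcases eq_or_ne (svF f T.length i) 0 with h0 | h0
  · rw [h0]; exact Bmax_nonneg T
  · rcases sv_le_runF f T.length i h0 with ⟨k, hk1, hk2, hk3⟩
    exact le_trans hk3 (le_trans (runF_le_topR f T.length 1 k hk1 hk2)
      (le_trans (le_max_right 0 _) htop))

theorem Amax_le_Bmax (T : List (List Int)) : AmaxD T ≤ BmaxD T := by
  apply fold_preserve_le _ _ _ _ (Bmax_nonneg T)
  intro acc r hacc hr
  apply fold_preserve_le _ _ _ _ hacc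
  intro acc2 c hacc2 hc
  apply max_le hacc2
  rcases PySem.List.mem_pyRange_one.mp hr with ⟨hr0, hrn⟩
  rcases PySem.List.mem_pyRange_one.mp hc with ⟨hc0, hcn⟩
  have hrr : ((r.toNat : Nat) : Int) = r := by omega
  have hcc : ((c.toNat : Nat) : Int) = c := by omega
  have hr' : r.toNat < T.length := by omega
  have hc' : c.toNat < T.length := by omega
  rw [← hrr, ← hcc, max4_getD]
  have hTB := top_fam_le_Bmax T
  apply max_le (max_le (max_le _ _) _) _
  · rw [check_down T r.toNat c.toNat hr' hc']
    exact sv_le_Bmax T _ _ hr' (hTB.2.2.1 c.toNat hc')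
  · rw [check_up T r.toNat c.toNat hr' hc']
    exact sv_le_Bmax T _ _ (by omega) (hTB.2.2.2 c.toNat hc')
  · rw [check_right T r.toNat c.toNat hr' hc']
    exact sv_le_Bmax T _ _ hc' (hTB.1 r.toNat hr')
  · rw [check_left T r.toNat c.toNat hr' hc']
    exact sv_le_Bmax T _ _ (by omega) (hTB.2.1 r.toNat hr')

theorem Amax_eq_Bmax (T : List (List Int)) : AmaxD T = BmaxD T :=
  le_antisymm (Amax_le_Bmax T) (Bmax_le_Amax T)

theorem find_eq_alt (T : List (List Int)) : find T = find_alt T := by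
  rw [find_as_Amax, find_alt_as_Bmax, Amax_eq_Bmax]

-- ===== VERDICT (by name: the statement is the Claim_ definition above) =====
theorem find_spec : Claim_equal_find := by
  intro T _ _
  unfold Spec_find
  exact find_eq_alt T
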